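-- pv_equiv track=rewrite | github.com/oigomezz/Retos | Hackerearth/Algorithms/Searching/Linear-Search/Find-Mex/solution.py | calculate_mex
-- ===== SOURCE A (Python) =====
-- def calculate_mex(arr):
--     seen = set()
--     current_mex = 0
--     result = []
--
--     for num in arr:
--         seen.add(num)
--         while current_mex in seen:
--             current_mex += 1
--         result.append(current_mex)
--
--     return result
-- ===== SOURCE B (Python) =====
-- def calculate_mex(arr):
--     result = []
--     for i in range(len(arr)):
--         mex = 0
--         for x in sorted(arr[:i + 1]):
--             if x == mex:
--                 mex += 1
--         result.append(mex)
--     return result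
-- ===== Notes on version B (the rewrite author's own statement) =====
-- stated objective: alternative
-- what changed: B replaces A's set with a carried monotonic MEX pointer by a per-prefix recomputation: each prefix is sliced, sorted, and its MEX read off by a single fold over the sorted copy (no set, no while loop, no carried state).
import Mathlib
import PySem

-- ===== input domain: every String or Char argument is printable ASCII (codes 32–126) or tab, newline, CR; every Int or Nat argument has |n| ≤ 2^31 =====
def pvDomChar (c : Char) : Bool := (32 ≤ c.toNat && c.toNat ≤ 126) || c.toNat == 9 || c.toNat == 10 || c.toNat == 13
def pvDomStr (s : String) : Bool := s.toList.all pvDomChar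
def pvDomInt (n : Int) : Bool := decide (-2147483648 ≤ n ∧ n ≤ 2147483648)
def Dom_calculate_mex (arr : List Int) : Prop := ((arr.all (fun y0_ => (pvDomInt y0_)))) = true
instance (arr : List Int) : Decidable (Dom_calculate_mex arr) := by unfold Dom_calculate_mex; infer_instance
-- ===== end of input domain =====

-- B re-implements A with a different algorithm: A keeps a set and a carried monotonic MEX pointer;
-- B recomputes each prefix's MEX from scratch by sorting a slice and folding over the sorted copy.

-- ===== PORT A =====
-- 'while current_mex in seen: current_mex += 1'; fuel (> number of set elements) only makes it total.
def pvWhileA (s : PySem.Set Int) (m : Int) : Nat → Int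
  | 0 => m
  | f + 1 => if m ∈ s then pvWhileA s (m + 1) f else m

-- the single 'for num in arr' loop of A, carrying (seen, current_mex, result)
def pvLoopA : List Int → PySem.Set Int → Int → List Int → List Int
  | [], _, _, result => result
  | num :: rest, seen, cm, result =>
    let seen' := PySem.Set.add seen num
    let cm' := pvWhileA seen' cm (seen'.length + 1)
    pvLoopA rest seen' cm' (result ++ [cm'])

def calculate_mex (arr : List Int) : List Int :=
  pvLoopA arr PySem.Set.empty 0 []

-- ===== PORT B =====
-- inner loop: 'mex = 0; for x in sorted(arr[:i+1]): if x == mex: mex += 1'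
def pvMexOf (pfx : List Int) : Int :=
  (PySem.List.sorted pfx (fun x => x) false).foldl
    (fun mex x => if x = mex then mex + 1 else mex) 0

-- outer loop: 'for i in range(len(arr)): result.append(…)'
def calculate_mex_alt (arr : List Int) : List Int :=
  (PySem.List.pyRange 0 (arr.length : Int) 1).foldl
    (fun result i => result ++ [pvMexOf (PySem.List.slice arr none (some (i + 1)))]) []

-- ===== PRECONDITION & SPEC =====
def Spec_calculate_mex (arr : List Int) (out : List Int) : Prop := out = calculate_mex_alt arr
instance (arr : List Int) (out : List Int) : Decidable (Spec_calculate_mex arr out) := by unfold Spec_calculate_mex; infer_instance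

-- ===== CLAIM (what is proved, stated in full; the proofs are below) =====
def Claim_equal_calculate_mex : Prop := ∀ (arr : List Int), Dom_calculate_mex arr → Spec_calculate_mex arr (calculate_mex arr)

-- ===== LEMMAS AND PROOFS =====

-- strictly fewer elements ≥ m+1 than ≥ m once m itself is in the list
theorem pv_countP_lt (s : List Int) (m : Int) (hm : m ∈ s) :
    s.countP (fun x => decide (m + 1 ≤ x)) < s.countP (fun x => decide (m ≤ x)) := by
  induction s with
  | nil => simp at hm
  | cons a t ih =>
    simp only [List.countP_cons]
    rcases List.mem_cons.mp hm with h | h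
    · subst h
      have h1 : t.countP (fun x => decide (m + 1 ≤ x)) ≤ t.countP (fun x => decide (m ≤ x)) := by
        apply List.countP_mono_left
        intro x _ hx
        simp only [decide_eq_true_eq] at *
        omega
      simp only [decide_eq_true_eq]
      have hmf : ¬ (m + 1 ≤ m) := by omega
      rw [if_neg (by simp [hmf]), if_pos (by simp)]
      omega
    · have := ih h
      split_ifs <;> simp_all <;> omega

-- characterization of A's while loop, given enough fuel
theorem pv_whileA_spec : ∀ (fuel : Nat) (s : PySem.Set Int) (m : Int),
    s.countP (fun x => decide (m ≤ x)) < fuel →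
    m ≤ pvWhileA s m fuel ∧ pvWhileA s m fuel ∉ s ∧
      ∀ k, m ≤ k → k < pvWhileA s m fuel → k ∈ s := by
  intro fuel
  induction fuel with
  | zero => intro s m h; omega
  | succ f ih =>
    intro s m h
    simp only [pvWhileA]
    split_ifs with hm
    · have hfuel : s.countP (fun x => decide (m + 1 ≤ x)) < f := by
        have := pv_countP_lt s m hm
        omega
      obtain ⟨h1, h2, h3⟩ := ih s (m + 1) hfuel
      refine ⟨by omega, h2, ?_⟩
      intro k hk1 hk2
      by_cases hkm : k = m
      · exact hkm ▸ hm
      · exact h3 k (by omega) hk2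
    · exact ⟨le_refl m, hm, fun k hk1 hk2 => absurd (by omega : m ≤ m ∧ m < m).2 (by omega)⟩

theorem pv_fuel_ok (s : PySem.Set Int) (m : Int) :
    s.countP (fun x => decide (m ≤ x)) < s.length + 1 :=
  Nat.lt_succ_of_le List.countP_le_length

-- B's fold never moves if no element of the list equals the current candidate
theorem pv_fold_const : ∀ (l : List Int) (m : Int), (∀ y ∈ l, y ≠ m) →
    l.foldl (fun mex x => if x = mex then mex + 1 else mex) m = m := by
  intro l
  induction l with
  | nil => intro m _; rfl
  | cons x t ih =>
    intro m h
    simp only [List.foldl_cons, if_neg (h x (List.mem_cons_self))]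
    exact ih m (fun y hy => h y (List.mem_cons_of_mem x hy))

-- MEX characterization of B's fold over a ≤-sorted list
theorem pv_fold_mex : ∀ (l : List Int), l.Pairwise (· ≤ ·) → ∀ (m : Int),
    m ≤ l.foldl (fun mex x => if x = mex then mex + 1 else mex) m ∧
    (∀ k, m ≤ k → k < l.foldl (fun mex x => if x = mex then mex + 1 else mex) m → k ∈ l) ∧
    l.foldl (fun mex x => if x = mex then mex + 1 else mex) m ∉ l := by
  intro l
  induction l with
  | nil =>
    intro _ m
    refine ⟨le_refl m, fun k h1 h2 => ?_, by simp⟩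
    simp only [List.foldl_nil] at h2; omega
  | cons x t ih =>
    intro hp m
    have hx : ∀ y ∈ t, x ≤ y := (List.pairwise_cons.mp hp).1
    have ht : t.Pairwise (· ≤ ·) := (List.pairwise_cons.mp hp).2
    simp only [List.foldl_cons]
    by_cases hxm : x = m
    · subst hxm
      rw [if_pos rfl]
      obtain ⟨h1, h2, h3⟩ := ih ht (x + 1)
      refine ⟨by omega, ?_, ?_⟩
      · intro k hk1 hk2
        by_cases hkx : k = x
        · exact hkx ▸ List.mem_cons_self
        · exact List.mem_cons_of_mem x (h2 k (by omega) hk2)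
      · intro hmem
        rcases List.mem_cons.mp hmem with h | h
        · omega
        · exact h3 h
    · rw [if_neg hxm]
      rcases Int.lt_or_le x m with hlt | hge
      · obtain ⟨h1, h2, h3⟩ := ih ht m
        refine ⟨h1, fun k hk1 hk2 => List.mem_cons_of_mem x (h2 k hk1 hk2), ?_⟩
        intro hmem
        rcases List.mem_cons.mp hmem with h | h
        · omega
        · exact h3 h
      · have hgt : m < x := lt_of_le_of_ne hge (fun h => hxm h.symm)
        have hconst : t.foldl (fun mex x => if x = mex then mex + 1 else mex) m = m :=
          pv_fold_const t m (fun y hy => by have := hx y hy; omega)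
        rw [hconst]
        refine ⟨le_refl m, fun k h1 h2 => absurd h2 (by omega), ?_⟩
        intro hmem
        rcases List.mem_cons.mp hmem with h | h
        · omega
        · have := hx _ h; omega

-- pvMexOf l is the MEX of l: nonnegative, not in l, everything below it in l
theorem pv_mexOf_spec (l : List Int) :
    0 ≤ pvMexOf l ∧ (∀ k, 0 ≤ k → k < pvMexOf l → k ∈ l) ∧ pvMexOf l ∉ l := by
  have hp : (PySem.List.sorted l (fun x => x) false).Pairwise (· ≤ ·) := by
    have := PySem.List.sorted_pairwise l (fun x => x)
    simp only at this
    exact this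
  obtain ⟨h1, h2, h3⟩ := pv_fold_mex (PySem.List.sorted l (fun x => x) false) hp 0
  unfold pvMexOf
  refine ⟨h1, fun k hk1 hk2 => ?_, fun h => h3 ?_⟩
  · exact (PySem.List.mem_sorted l (fun x => x) false k).mp (h2 k hk1 hk2)
  · exact (PySem.List.mem_sorted l (fun x => x) false (pvMexOf l)).mpr h

-- any two values with the MEX characterization w.r.t. the same list agree
theorem pv_mex_unique (l : List Int) (a b : Int)
    (ha0 : 0 ≤ a) (ha1 : ∀ k, 0 ≤ k → k < a → k ∈ l) (ha2 : a ∉ l)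
    (hb0 : 0 ≤ b) (hb1 : ∀ k, 0 ≤ k → k < b → k ∈ l) (hb2 : b ∉ l) : a = b := by
  rcases lt_trichotomy a b with h | h | h
  · exact absurd (hb1 a ha0 h) ha2
  · exact h
  · exact absurd (ha1 b hb0 h) hb2

-- loop invariant: A's carried pointer produces exactly the per-prefix MEX values of B
theorem pv_loopA_eq : ∀ (rest pre : List Int) (seen : PySem.Set Int) (cm : Int) (res : List Int),
    (∀ x : Int, x ∈ seen ↔ x ∈ pre) → 0 ≤ cm → (∀ k : Int, 0 ≤ k → k < cm → k ∈ pre) →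
    pvLoopA rest seen cm res =
      res ++ (List.range rest.length).map (fun j => pvMexOf (pre ++ rest.take (j + 1))) := by
  intro rest
  induction rest with
  | nil => intro pre seen cm res _ _ _; simp [pvLoopA]
  | cons num t ih =>
    intro pre seen cm res hseen hcm hinv
    simp only [pvLoopA]
    set seen' := PySem.Set.add seen num with hseen'def
    have hseen'mem : ∀ x : Int, x ∈ seen' ↔ x ∈ pre ++ [num] := by
      intro x
      rw [hseen'def, PySem.Set.mem_add, hseen x]
      simp [or_comm]
    set cm' := pvWhileA seen' cm (seen'.length + 1) with hcm'def
    obtain ⟨s1, s2, s3⟩ := pv_whileA_spec (seen'.length + 1) seen' cm (pv_fuel_ok seen' cm)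
    have hcm'0 : 0 ≤ cm' := by omega
    have hbelow : ∀ k : Int, 0 ≤ k → k < cm' → k ∈ pre ++ [num] := by
      intro k h1 h2
      by_cases hk : k < cm
      · exact List.mem_append_left _ (hinv k h1 hk)
      · exact (hseen'mem k).mp (s3 k (by omega) h2)
    have hnotin : cm' ∉ pre ++ [num] := fun h => s2 ((hseen'mem cm').mpr h)
    have hmex : cm' = pvMexOf (pre ++ [num]) := by
      obtain ⟨m0, m1, m2⟩ := pv_mexOf_spec (pre ++ [num])
      exact pv_mex_unique (pre ++ [num]) cm' (pvMexOf (pre ++ [num]))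
        hcm'0 hbelow hnotin m0 m1 m2
    rw [ih (pre ++ [num]) seen' cm' (res ++ [cm']) hseen'mem hcm'0 hbelow]
    rw [List.length_cons, List.range_succ_eq_map, List.map_cons, List.map_map]
    simp only [List.take_succ_cons, List.take_zero]
    rw [hmex]
    rw [List.append_assoc res, List.singleton_append]
    refine congrArg (fun z => res ++ (pvMexOf (pre ++ [num]) :: z)) ?_
    apply List.map_congr_left
    intro j _
    simp [Function.comp, List.append_assoc]

-- B unfolded: the i-th appended value is the MEX of arr[:i+1]
theorem pv_alt_eq (arr : List Int) :
    calculate_mex_alt arr =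
      (List.range arr.length).map (fun j => pvMexOf (arr.take (j + 1))) := by
  unfold calculate_mex_alt
  rw [PySem.List.foldl_append_singleton_eq_map]
  rw [PySem.List.pyRange_one, List.map_map]
  simp only [Int.sub_zero, Int.toNat_natCast]
  apply List.map_congr_left
  intro k _
  have hcast : (0 : Int) + (k : Int) + 1 = ((k + 1 : Nat) : Int) := by push_cast; ring
  simp only [Function.comp, hcast, PySem.List.slice_to_natCast]

-- ===== VERDICT (by name: the statement is the Claim_ definition above) =====
theorem calculate_mex_spec : Claim_equal_calculate_mex := by
  intro arr _
  show calculate_mex arr = calculate_mex_alt arr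
  unfold calculate_mex
  rw [pv_alt_eq arr,
    pv_loopA_eq arr [] PySem.Set.empty 0 [] (by simp [PySem.Set.empty]) (le_refl 0)
      (fun k h1 h2 => absurd h1 (by omega))]
  simp
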